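-- pv_equiv track=rewrite | github.com/bolubee101/DS-Algos | counting-mountains.py | counting_mountains
-- ===== SOURCE A (Python) =====
-- def counting_mountains(steps, string_steps):
--     mountain = 0
--     valley = 0
--     for i in range(0, steps):
--         if string_steps[i] == 'D':
--             valley += 1
--             if valley == 0:
--                 mountain += 1
--         else:
--             valley -= 1
--     return mountain
-- ===== SOURCE B (Python) =====
-- def counting_mountains(steps, string_steps):
--     # pass 1: build the prefix-sum table (D = +1, anything else = -1)
--     sums = []
--     total = 0
--     for i in range(steps):
--         total += 1 if string_steps[i] == 'D' else -1
--         sums.append(total)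
--     # pass 2: a mountain is a 'D' step whose prefix sum through it is 0
--     return sum(1 for i in range(steps)
--                if string_steps[i] == 'D' and sums[i] == 0)
-- ===== Notes on version B (the rewrite author's own statement) =====
-- stated objective: alternative
-- what changed: Replaces the single stateful loop (inline mountain/valley accumulators) by two separate passes: first build the prefix-sum table of the steps, then count the 'D' positions whose prefix sum is 0.
import Mathlib
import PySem

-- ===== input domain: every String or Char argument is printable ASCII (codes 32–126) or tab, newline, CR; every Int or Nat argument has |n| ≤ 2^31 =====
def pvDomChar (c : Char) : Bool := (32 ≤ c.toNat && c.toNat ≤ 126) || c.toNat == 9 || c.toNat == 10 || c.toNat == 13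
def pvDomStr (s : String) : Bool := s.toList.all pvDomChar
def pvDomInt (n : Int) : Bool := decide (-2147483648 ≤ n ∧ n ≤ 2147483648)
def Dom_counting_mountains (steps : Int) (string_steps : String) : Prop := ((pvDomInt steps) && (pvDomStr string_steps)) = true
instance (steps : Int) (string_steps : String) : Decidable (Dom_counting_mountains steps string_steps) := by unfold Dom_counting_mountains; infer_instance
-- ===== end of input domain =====

-- B splits A's single stateful mountain/valley loop into a prefix-sum table pass followed by a separate counting pass (alternative decomposition, same cost).


-- ===== PORT A =====
def counting_mountains (steps : Int) (string_steps : String) : Int :=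
  let r := (PySem.List.pyRange 0 steps 1).foldl (fun (mv : Int × Int) i =>
    if PySem.Str.pyGet? string_steps i = some 'D' then
      let v := mv.2 + 1
      (if v = 0 then mv.1 + 1 else mv.1, v)
    else (mv.1, mv.2 - 1)) (0, 0)
  r.1

-- ===== PORT B =====
def counting_mountains_alt (steps : Int) (string_steps : String) : Int :=
  -- pass 1: prefix-sum table
  let sums := ((PySem.List.pyRange 0 steps 1).foldl (fun (st : Int × List Int) i =>
      let t := st.1 + (if PySem.Str.pyGet? string_steps i = some 'D' then 1 else -1)
      (t, st.2 ++ [t])) ((0 : Int), ([] : List Int))).2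
  -- pass 2: count 'D' positions with prefix sum 0
  (PySem.List.pyRange 0 steps 1).foldl (fun acc i =>
    if PySem.Str.pyGet? string_steps i = some 'D' ∧ PySem.List.pyGetD sums i 0 = 0 then
      acc + 1 else acc) 0

-- ===== PRECONDITION & SPEC =====
-- Pre_ excludes exactly steps > len(string_steps), where A (and B) raise IndexError.
def Pre_counting_mountains (steps : Int) (string_steps : String) : Prop :=
  steps ≤ PySem.Str.len string_steps
instance (steps : Int) (string_steps : String) : Decidable (Pre_counting_mountains steps string_steps) := by unfold Pre_counting_mountains; infer_instance
def pvWitness_counting_mountains : Int × String := (4, "UDDU")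

def Spec_counting_mountains (steps : Int) (string_steps : String) (out : Int) : Prop := out = counting_mountains_alt steps string_steps
instance (steps : Int) (string_steps : String) (out : Int) : Decidable (Spec_counting_mountains steps string_steps out) := by unfold Spec_counting_mountains; infer_instance

-- ===== CLAIM (what is proved, stated in full; the proofs are below) =====
def Claim_equal_counting_mountains : Prop := ∀ (steps : Int) (string_steps : String), Dom_counting_mountains steps string_steps → Pre_counting_mountains steps string_steps → Spec_counting_mountains steps string_steps (counting_mountains steps string_steps)

-- ===== LEMMAS AND PROOFS =====

/-- The running sum after `n` steps (D = +1, anything else = −1). -/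
def pvS (s : String) : Nat → Int
  | 0 => 0
  | n + 1 => pvS s n + (if PySem.Str.pyGet? s (n : Int) = some 'D' then 1 else -1)

/-- A's mountain count after `n` steps. -/
def pvM (s : String) : Nat → Int
  | 0 => 0
  | n + 1 => if PySem.Str.pyGet? s (n : Int) = some 'D' ∧ pvS s (n + 1) = 0 then pvM s n + 1 else pvM s n

lemma pvA_fold (s : String) (n : Nat) :
    (PySem.List.pyRange 0 (n : Int) 1).foldl (fun (mv : Int × Int) i =>
      if PySem.Str.pyGet? s i = some 'D' then
        (if mv.2 + 1 = 0 then mv.1 + 1 else mv.1, mv.2 + 1)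
      else (mv.1, mv.2 - 1)) (0, 0) = (pvM s n, pvS s n) := by
  induction n with
  | zero => simp [PySem.List.pyRange_one_eq_nil, pvM, pvS]
  | succ n ih =>
    have h : ((n : Int) + 1) = ((n + 1 : Nat) : Int) := by push_cast; ring
    rw [← h, PySem.List.pyRange_one_succ_right (by positivity), List.foldl_append, ih]
    by_cases hd : s.toList[n]? = some 'D'
    · by_cases hz : pvS s n + 1 = 0 <;>
        simp [List.foldl, pvM, pvS, hd, hz]
    · simp [List.foldl, pvM, pvS, hd, sub_eq_add_neg]

lemma pvB_sums (s : String) (n : Nat) :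
    (PySem.List.pyRange 0 (n : Int) 1).foldl (fun (st : Int × List Int) i =>
      let t := st.1 + (if PySem.Str.pyGet? s i = some 'D' then 1 else -1)
      (t, st.2 ++ [t])) ((0 : Int), ([] : List Int))
    = (pvS s n, (List.range n).map (fun k => pvS s (k + 1))) := by
  induction n with
  | zero => simp [PySem.List.pyRange_one_eq_nil, pvS]
  | succ n ih =>
    have h : ((n : Int) + 1) = ((n + 1 : Nat) : Int) := by push_cast; ring
    rw [← h, PySem.List.pyRange_one_succ_right (by positivity), List.foldl_append, ih]
    simp [List.range_succ, pvS]

lemma pvB_count (s : String) (N : Nat) (n : Nat) (hn : n ≤ N) :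
    (PySem.List.pyRange 0 (n : Int) 1).foldl (fun acc i =>
      if PySem.Str.pyGet? s i = some 'D' ∧
          PySem.List.pyGetD ((List.range N).map (fun k => pvS s (k + 1))) i 0 = 0 then
        acc + 1 else acc) 0 = pvM s n := by
  induction n with
  | zero => simp [PySem.List.pyRange_one_eq_nil, pvM]
  | succ n ih =>
    have h : ((n : Int) + 1) = ((n + 1 : Nat) : Int) := by push_cast; ring
    rw [← h, PySem.List.pyRange_one_succ_right (by positivity), List.foldl_append,
        ih (by omega)]
    have hget : PySem.List.pyGetD ((List.range N).map (fun k => pvS s (k + 1))) ((n : Nat) : Int) 0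
        = pvS s (n + 1) := by
      rw [PySem.List.pyGetD_natCast]
      have hlt : n < ((List.range N).map (fun k => pvS s (k + 1))).length := by
        simpa using (by omega : n < N)
      rw [List.getD_eq_getElem _ _ hlt]
      simp
    simp only [List.foldl, hget]
    by_cases hc : PySem.Str.pyGet? s (n : Int) = some 'D' ∧ pvS s (n + 1) = 0 <;>
      simp [pvM, hc]

-- ===== VERDICT (by name: the statement is the Claim_ definition above) =====
theorem counting_mountains_spec : Claim_equal_counting_mountains := by
  intro steps s _ _
  unfold Spec_counting_mountains counting_mountains counting_mountains_alt
  by_cases hpos : 0 ≤ steps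
  · obtain ⟨n, rfl⟩ : ∃ n : Nat, steps = (n : Int) := ⟨steps.toNat, (Int.toNat_of_nonneg hpos).symm⟩
    rw [pvA_fold, pvB_sums, pvB_count s n n le_rfl]
  · rw [PySem.List.pyRange_one_eq_nil (by omega)]
    simp
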